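-- pv_equiv track=rewrite | github.com/Holedozer1229/Sphinx_OS | mrbeast/mr_beast.py | word_segment
-- ===== SOURCE A (Python) =====
-- from typing import List, Optional, Tuple
--
-- def word_segment(letters: str, wordlist: set) -> List[str]:
--     """
--     Dynamic programming word segmentation.
--     Returns the segmentation with the highest number of words (simple heuristic).
--     """
--     n = len(letters)
--     # dp[i] = (best segmentation of letters[:i], word count)
--     dp = [(None, -1) for _ in range(n+1)]
--     dp[0] = ([], 0)
--     for i in range(1, n+1):
--         best_seg = None
--         best_cnt = -1
--         for j in range(max(0, i-12), i):  # assume max word length 12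
--             word = letters[j:i]
--             if word in wordlist:
--                 prev_seg, prev_cnt = dp[j]
--                 if prev_seg is not None and prev_cnt + 1 > best_cnt:
--                     best_cnt = prev_cnt + 1
--                     best_seg = prev_seg + [word]
--         if best_seg is not None:
--             dp[i] = (best_seg, best_cnt)
--     # Also allow fallback: single letters if no word found (but we want words)
--     if dp[n][0] is None:
--         # fallback: treat each letter as a word
--         return list(letters)
--     return dp[n][0]
-- ===== SOURCE B (Python) =====
-- def word_segment(letters: str, wordlist: set):
--     """Backpointer DP: store word counts and back-pointers instead of copying
--     whole segmentation lists, then reconstruct the answer once at the end."""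
--     n = len(letters)
--     cnt = [-1] * (n + 1)
--     back = [-1] * (n + 1)
--     cnt[0] = 0
--     for i in range(1, n + 1):
--         best_cnt = -1
--         best_j = -1
--         for j in range(max(0, i - 12), i):
--             c = cnt[j]
--             if c >= 0 and letters[j:i] in wordlist and c + 1 > best_cnt:
--                 best_cnt = c + 1
--                 best_j = j
--         if best_j >= 0:
--             cnt[i] = best_cnt
--             back[i] = best_j
--     if cnt[n] < 0:
--         return list(letters)
--     out = []
--     i = n
--     while i > 0:
--         j = back[i]
--         out.append(letters[j:i])
--         i = j
--     out.reverse()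
--     return out
-- ===== Notes on version B (the rewrite author's own statement) =====
-- stated objective: faster
-- what changed: Replaces A's dp table of whole segmentation lists (copied via prev_seg + [word] at every candidate) by a backpointer DP storing only word counts and the chosen predecessor index, reconstructing the single winning segmentation once at the end.
import Mathlib
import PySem

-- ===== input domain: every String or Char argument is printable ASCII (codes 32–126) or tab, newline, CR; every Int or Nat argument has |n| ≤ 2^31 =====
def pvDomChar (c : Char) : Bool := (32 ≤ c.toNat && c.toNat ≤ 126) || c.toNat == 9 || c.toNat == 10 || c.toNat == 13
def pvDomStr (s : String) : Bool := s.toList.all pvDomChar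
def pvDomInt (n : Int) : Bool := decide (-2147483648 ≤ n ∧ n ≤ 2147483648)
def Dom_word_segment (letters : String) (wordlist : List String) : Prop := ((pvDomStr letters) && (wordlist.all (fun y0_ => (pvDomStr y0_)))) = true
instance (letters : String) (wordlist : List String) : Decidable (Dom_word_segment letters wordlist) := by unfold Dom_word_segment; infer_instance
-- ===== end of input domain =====

-- B replaces A's dp table of whole segmentation lists (copied at every candidate) by a
-- backpointer DP over word counts, rebuilding the one winning segmentation at the end (faster).

-- ===== PORT A =====
-- body of A's inner 'for j' loop
def wsInnerA (cl : List Char) (wordlist : List String) (dp : List (Option (List String) × Int))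
    (i : Int) (st : Option (List String) × Int) (j : Int) : Option (List String) × Int :=
  let word := String.ofList (PySem.List.slice cl (some j) (some i))
  if PySem.Set.contains wordlist word then
    match PySem.List.pyGetD dp j (none, -1) with
    | (some prevSeg, prevCnt) =>
      if prevCnt + 1 > st.2 then (some (prevSeg ++ [word]), prevCnt + 1) else st
    | (none, _) => st
  else st

-- body of A's outer 'for i' loop
def wsStepA (cl : List Char) (wordlist : List String) (dp : List (Option (List String) × Int))
    (i : Int) : List (Option (List String) × Int) :=
  let best := (PySem.List.pyRange (max 0 (i - 12)) i 1).foldl (wsInnerA cl wordlist dp i)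
    ((none : Option (List String)), (-1 : Int))
  if best.1.isSome then PySem.List.pySetD dp i best else dp

def word_segment (letters : String) (wordlist : List String) : List String :=
  let cl := letters.toList
  let n : Int := PySem.Str.len letters
  let dp0 := (PySem.List.pyRange 0 (n + 1) 1).map (fun _ => ((none : Option (List String)), (-1 : Int)))
  let dp1 := PySem.List.pySetD dp0 0 (some [], 0)
  let dp := (PySem.List.pyRange 1 (n + 1) 1).foldl (wsStepA cl wordlist) dp1
  match (PySem.List.pyGetD dp n (none, -1)).1 with
  | none => cl.map (fun c => String.ofList [c])
  | some seg => seg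

-- ===== PORT B =====
-- body of B's inner 'for j' loop: accumulator b = (best_cnt, best_j)
def wsInnerB (cl : List Char) (wordlist : List String) (cnt : List Int) (i : Int)
    (b : Int × Int) (j : Int) : Int × Int :=
  let c := PySem.List.pyGetD cnt j (-1)
  if 0 ≤ c ∧ PySem.Set.contains wordlist (String.ofList (PySem.List.slice cl (some j) (some i))) = true ∧ b.1 < c + 1 then
    (c + 1, j)
  else b

-- body of B's 'for i' loop: state = (cnt, back)
def wsStepB (cl : List Char) (wordlist : List String) (st : List Int × List Int) (i : Int) :
    List Int × List Int :=
  let best := (PySem.List.pyRange (max 0 (i - 12)) i 1).foldl (wsInnerB cl wordlist st.1 i)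
    ((-1 : Int), (-1 : Int))
  if 0 ≤ best.2 then (PySem.List.pySetD st.1 i best.1, PySem.List.pySetD st.2 i best.2) else st

-- B's reconstruction while-loop (fuel = len(letters) bounds its iteration count)
def wsRebuild (cl : List Char) (back : List Int) : Nat → Int → List String → List String
  | 0, _, out => out
  | fuel + 1, i, out =>
    if 0 < i then
      let j := PySem.List.pyGetD back i (-1)
      wsRebuild cl back fuel j (out ++ [String.ofList (PySem.List.slice cl (some j) (some i))])
    else out

def word_segment_alt (letters : String) (wordlist : List String) : List String :=
  let cl := letters.toList
  let n : Int := PySem.Str.len letters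
  let cnt0 := PySem.List.pySetD (PySem.List.pyRepeat [(-1 : Int)] (n + 1)) 0 0
  let back0 := PySem.List.pyRepeat [(-1 : Int)] (n + 1)
  let st := (PySem.List.pyRange 1 (n + 1) 1).foldl (wsStepB cl wordlist) (cnt0, back0)
  if PySem.List.pyGetD st.1 n (-1) < 0 then cl.map (fun c => String.ofList [c])
  else (wsRebuild cl st.2 cl.length n []).reverse

-- ===== PRECONDITION & SPEC =====
def Spec_word_segment (letters : String) (wordlist : List String) (out : List String) : Prop := out = word_segment_alt letters wordlist
instance (letters : String) (wordlist : List String) (out : List String) : Decidable (Spec_word_segment letters wordlist out) := by unfold Spec_word_segment; infer_instance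

-- ===== CLAIM (what is proved, stated in full; the proofs are below) =====
def Claim_equal_word_segment : Prop := ∀ (letters : String) (wordlist : List String), Dom_word_segment letters wordlist → Spec_word_segment letters wordlist (word_segment letters wordlist)

-- ===== LEMMAS AND PROOFS =====

-- the loop invariant: after the 'for i' loops have processed i = 1..k-1, A's dp and B's
-- (cnt, back) agree: same counts, same reachability, and each reached dp entry is its
-- back-predecessor's entry extended by the chosen word.
def wsInv (cl : List Char) (k : Nat) (dp : List (Option (List String) × Int)) (cnt back : List Int) : Prop :=
  dp.length = cl.length + 1 ∧ cnt.length = cl.length + 1 ∧ back.length = cl.length + 1 ∧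
  ∀ m : Nat, m ≤ cl.length →
    ((m < k →
      (PySem.List.pyGetD dp (m : Int) (none, -1)).2 = PySem.List.pyGetD cnt (m : Int) (-1) ∧
      (PySem.List.pyGetD cnt (m : Int) (-1) < 0 → (PySem.List.pyGetD dp (m : Int) (none, -1)).1 = none) ∧
      (0 ≤ PySem.List.pyGetD cnt (m : Int) (-1) →
        (m = 0 → PySem.List.pyGetD dp (m : Int) (none, -1) = (some [], 0)) ∧
        (0 < m → ∃ b : Nat, PySem.List.pyGetD back (m : Int) (-1) = (b : Int) ∧ b < m ∧
          ∃ S cb, PySem.List.pyGetD dp (b : Int) (none, -1) = (some S, cb) ∧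
            (PySem.List.pyGetD dp (m : Int) (none, -1)).1 =
              some (S ++ [String.ofList (PySem.List.slice cl (some (b : Int)) (some (m : Int)))])))) ∧
     (k ≤ m → PySem.List.pyGetD dp (m : Int) (none, -1) = (none, -1) ∧
        PySem.List.pyGetD cnt (m : Int) (-1) = -1 ∧ PySem.List.pyGetD back (m : Int) (-1) = -1))

-- relation between the two inner-loop accumulators
def wsR (cl : List Char) (dp : List (Option (List String) × Int)) (i : Nat)
    (stA : Option (List String) × Int) (stB : Int × Int) : Prop :=
  stA.2 = stB.1 ∧
  ((stA.1 = none ∧ stB.1 = -1 ∧ stB.2 = -1) ∨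
   (∃ b : Nat, stB.2 = (b : Int) ∧ b < i ∧ ∃ S cb,
      PySem.List.pyGetD dp (b : Int) (none, -1) = (some S, cb) ∧
      stA.1 = some (S ++ [String.ofList (PySem.List.slice cl (some (b : Int)) (some (i : Int)))]) ∧
      stB.1 = cb + 1))

lemma ws_inner (cl : List Char) (wl : List String) (dp : List (Option (List String) × Int))
    (cnt back : List Int) (i : Nat) (hi : i ≤ cl.length)
    (hInv : wsInv cl i dp cnt back) (js : List Int) (hjs : ∀ j ∈ js, 0 ≤ j ∧ j < (i : Int)) :
    ∀ stA stB, wsR cl dp i stA stB →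
      wsR cl dp i (js.foldl (wsInnerA cl wl dp (i : Int)) stA)
        (js.foldl (wsInnerB cl wl cnt (i : Int)) stB) := by
  revert hjs
  induction js with
  | nil => intro _ stA stB h; exact h
  | cons j js ih =>
    intro hjs stA stB hR
    obtain ⟨hj0, hji⟩ := hjs j (List.mem_cons_self)
    simp only [List.foldl_cons]
    refine ih (fun x hx => hjs x (List.mem_cons_of_mem _ hx)) _ _ ?_
    obtain ⟨m, rfl⟩ : ∃ m : Nat, j = (m : Int) := ⟨j.toNat, (Int.toNat_of_nonneg hj0).symm⟩
    have hmi : m < i := by exact_mod_cast hji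
    obtain ⟨hdl, hcl, hbl, hAll⟩ := hInv
    obtain ⟨hd2, hneg, hpos⟩ := (hAll m (by omega)).1 hmi
    rcases hdp : PySem.List.pyGetD dp ((m : Nat) : Int) ((none : Option (List String)), (-1 : Int)) with ⟨optS, cb⟩
    have hcnt : PySem.List.pyGetD cnt (m : Int) (-1) = cb := by rw [← hd2, hdp]
    by_cases hc : PySem.Set.contains wl (String.ofList (PySem.List.slice cl (some (m : Int)) (some (i : Int)))) = true
    · cases optS with
      | none =>
        have hcneg : PySem.List.pyGetD cnt (m : Int) (-1) < 0 := by
          by_contra hge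
          push_neg at hge
          obtain ⟨h0, hp⟩ := hpos hge
          rcases Nat.eq_zero_or_pos m with hm0 | hm0
          · have := h0 hm0; rw [hdp] at this; simp at this
          · obtain ⟨b, _, _, S, cb', _, h1⟩ := hp hm0
            rw [hdp] at h1; simp at h1
        have eqA : wsInnerA cl wl dp (i : Int) stA (m : Int) = stA := by
          simp only [wsInnerA, hc, if_true, hdp]
        have eqB : wsInnerB cl wl cnt (i : Int) stB (m : Int) = stB := by
          simp only [wsInnerB]
          rw [if_neg]
          intro h; exact absurd h.1 (by omega)
        rw [eqA, eqB]; exact hR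
      | some S =>
        have hge : 0 ≤ PySem.List.pyGetD cnt (m : Int) (-1) := by
          by_contra hlt
          push_neg at hlt
          have h := hneg hlt
          rw [hdp] at h; simp at h
        obtain ⟨h12, hcase⟩ := hR
        by_cases hcond : stB.1 < cb + 1
        · have eqA : wsInnerA cl wl dp (i : Int) stA (m : Int) =
              (some (S ++ [String.ofList (PySem.List.slice cl (some (m : Int)) (some (i : Int)))]), cb + 1) := by
            simp only [wsInnerA, hc, if_true, hdp]
            rw [if_pos]; rw [h12]; exact hcond
          have eqB : wsInnerB cl wl cnt (i : Int) stB (m : Int) = (cb + 1, (m : Int)) := by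
            simp only [wsInnerB, hcnt]
            rw [if_pos ⟨by omega, hc, hcond⟩]
          rw [eqA, eqB]
          exact ⟨rfl, Or.inr ⟨m, rfl, hmi, S, cb, hdp, rfl, rfl⟩⟩
        · have eqA : wsInnerA cl wl dp (i : Int) stA (m : Int) = stA := by
            simp only [wsInnerA, hc, if_true, hdp]
            rw [if_neg]; rw [h12]; exact hcond
          have eqB : wsInnerB cl wl cnt (i : Int) stB (m : Int) = stB := by
            simp only [wsInnerB, hcnt]
            rw [if_neg]
            intro h; exact hcond h.2.2
          rw [eqA, eqB]; exact ⟨h12, hcase⟩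
    · have eqA : wsInnerA cl wl dp (i : Int) stA (m : Int) = stA := by
        simp only [wsInnerA]
        rw [if_neg hc]
      have eqB : wsInnerB cl wl cnt (i : Int) stB (m : Int) = stB := by
        simp only [wsInnerB]
        rw [if_neg]
        intro h; exact hc h.2.1
      rw [eqA, eqB]; exact hR

lemma ws_step (cl : List Char) (wl : List String) (i : Nat) (hi1 : 1 ≤ i) (hi : i ≤ cl.length)
    (dp : List (Option (List String) × Int)) (cnt back : List Int)
    (hInv : wsInv cl i dp cnt back) :
    wsInv cl (i + 1) (wsStepA cl wl dp (i : Int))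
      (wsStepB cl wl (cnt, back) (i : Int)).1 (wsStepB cl wl (cnt, back) (i : Int)).2 := by
  have hjs : ∀ j ∈ PySem.List.pyRange (max 0 ((i : Int) - 12)) (i : Int) 1, 0 ≤ j ∧ j < (i : Int) := by
    intro j hj
    rw [PySem.List.mem_pyRange_one] at hj
    exact ⟨le_trans (le_max_left _ _) hj.1, hj.2⟩
  have hfold := ws_inner cl wl dp cnt back i hi hInv _ hjs
    ((none : Option (List String)), (-1 : Int)) ((-1 : Int), (-1 : Int))
    ⟨rfl, Or.inl ⟨rfl, rfl, rfl⟩⟩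
  obtain ⟨hdl, hcl, hbl, hAll⟩ := hInv
  have hidp : i < dp.length := by omega
  have hicnt : i < cnt.length := by omega
  have hiback : i < back.length := by omega
  simp only [wsStepA, wsStepB]
  obtain ⟨h12, hcase⟩ := hfold
  rcases hcase with ⟨hA1, hB1, hB2⟩ | ⟨b, hB2, hbi, S, cb, hdpb, hA1, hB1⟩
  · rw [hA1, hB2]
    simp only [Option.isSome_none, Bool.false_eq_true, if_false]
    rw [if_neg (by norm_num)]
    refine ⟨hdl, hcl, hbl, ?_⟩
    intro m hm
    refine ⟨?_, ?_⟩
    · intro hmk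
      rcases Nat.lt_or_ge m i with hlt | hge
      · exact (hAll m hm).1 hlt
      · have hmi : m = i := by omega
        obtain ⟨e1, e2, e3⟩ := (hAll m hm).2 (by omega)
        rw [e1, e2]
        exact ⟨rfl, fun _ => rfl, fun h => absurd h (by norm_num)⟩
    · intro hge
      exact (hAll m hm).2 (by omega)
  · have hcb : 0 ≤ cb := by
      have hbn : b ≤ cl.length := by omega
      obtain ⟨hd2b, hnegb, _⟩ := (hAll b hbn).1 (by omega)
      by_contra hlt
      push_neg at hlt
      have : PySem.List.pyGetD cnt (b : Int) (-1) < 0 := by rw [← hd2b, hdpb]; exact hlt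
      have h := hnegb this
      rw [hdpb] at h; simp at h
    have hbest : ((PySem.List.pyRange (max 0 ((i : Int) - 12)) (i : Int) 1).foldl
        (wsInnerA cl wl dp (i : Int)) ((none : Option (List String)), (-1 : Int))) =
        (some (S ++ [String.ofList (PySem.List.slice cl (some (b : Int)) (some (i : Int)))]), cb + 1) := by
      refine Prod.ext hA1 ?_
      rw [h12, hB1]
    rw [hbest, hB1, hB2]
    simp only [Option.isSome_some, if_true]
    rw [if_pos (by positivity)]
    refine ⟨by simp [hdl], by simp [hcl], by simp [hbl], ?_⟩
    intro m hm
    have hdpset : ∀ (d : Option (List String) × Int) (m' : Nat),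
        PySem.List.pyGetD (PySem.List.pySetD dp ((i : Nat) : Int)
          (some (S ++ [String.ofList (PySem.List.slice cl (some (b : Int)) (some (i : Int)))]), cb + 1)) (m' : Int) d =
        if m' = i then (some (S ++ [String.ofList (PySem.List.slice cl (some (b : Int)) (some (i : Int)))]), cb + 1)
        else PySem.List.pyGetD dp (m' : Int) d := by
      intro d m'
      rw [PySem.List.pyGetD_pySetD_natCast dp i m' _ _ hidp]
    have hcntset : ∀ (m' : Nat),
        PySem.List.pyGetD (PySem.List.pySetD cnt ((i : Nat) : Int) (cb + 1)) (m' : Int) (-1) =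
        if m' = i then cb + 1 else PySem.List.pyGetD cnt (m' : Int) (-1) := by
      intro m'
      rw [PySem.List.pyGetD_pySetD_natCast cnt i m' _ _ hicnt]
    have hbackset : ∀ (m' : Nat),
        PySem.List.pyGetD (PySem.List.pySetD back ((i : Nat) : Int) ((b : Nat) : Int)) (m' : Int) (-1) =
        if m' = i then ((b : Nat) : Int) else PySem.List.pyGetD back (m' : Int) (-1) := by
      intro m'
      rw [PySem.List.pyGetD_pySetD_natCast back i m' _ _ hiback]
    refine ⟨?_, ?_⟩
    · intro hmk
      rcases Nat.lt_or_ge m i with hlt | hge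
      · -- untouched processed entry
        obtain ⟨e1, e2, e3⟩ := (hAll m hm).1 hlt
        rw [hdpset, hcntset, hbackset, if_neg (by omega), if_neg (by omega), if_neg (by omega)]
        refine ⟨e1, e2, ?_⟩
        intro hge0
        obtain ⟨f1, f2⟩ := e3 hge0
        refine ⟨f1, ?_⟩
        intro hm0
        obtain ⟨b', g1, g2, S', cb', g3, g4⟩ := f2 hm0
        exact ⟨b', g1, g2, S', cb', by rw [hdpset, if_neg (by omega)]; exact g3, g4⟩
      · -- the freshly written entry m = i
        have hmi : m = i := by omega
        subst hmi
        rw [hdpset, hcntset, hbackset, if_pos rfl, if_pos rfl, if_pos rfl]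
        refine ⟨rfl, by intro h; omega, ?_⟩
        intro _
        refine ⟨by omega, ?_⟩
        intro _
        exact ⟨b, rfl, hbi, S, cb, by rw [hdpset, if_neg (by omega)]; exact hdpb, rfl⟩
    · intro hge
      obtain ⟨e1, e2, e3⟩ := (hAll m hm).2 (by omega)
      rw [hdpset, hcntset, hbackset, if_neg (by omega), if_neg (by omega), if_neg (by omega)]
      exact ⟨e1, e2, e3⟩

lemma ws_init_dp (cl : List Char) (m : Nat) (hm : m ≤ cl.length) :
    PySem.List.pyGetD (PySem.List.pySetD ((PySem.List.pyRange 0 ((cl.length : Int) + 1) 1).map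
      (fun _ => ((none : Option (List String)), (-1 : Int)))) 0 (some [], 0)) (m : Int)
      ((none : Option (List String)), (-1 : Int)) =
    if m = 0 then (some [], 0) else (none, -1) := by
  have hcast : ((cl.length : Int) + 1) = ((cl.length + 1 : Nat) : Int) := by push_cast; ring
  rw [PySem.List.pySetD_of_nonneg _ _ (by norm_num)]
  rw [PySem.List.pyGetD_natCast]
  rw [List.getD_eq_getElem?_getD, List.getElem?_set]
  rw [hcast, PySem.List.getElem?_map_pyRange_zero _ _ _ (by omega)]
  have hlen : (0 : Int).toNat < ((PySem.List.pyRange 0 ((cl.length + 1 : Nat) : Int) 1).map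
      (fun _ => ((none : Option (List String)), (-1 : Int)))).length := by
    rw [List.length_map, PySem.List.length_pyRange_one]; omega
  by_cases h0 : m = 0
  · subst h0
    simp
  · rw [if_neg (by omega), if_neg h0]
    simp

lemma ws_init_flat (cl : List Char) (x : Int) (m : Nat) :
    PySem.List.pyGetD (PySem.List.pyRepeat [x] ((cl.length : Int) + 1)) (m : Int) (-1) =
    if m ≤ cl.length then x else -1 := by
  rw [PySem.List.pyRepeat_singleton, PySem.List.pyGetD_natCast]
  rw [List.getD_eq_getElem?_getD, List.getElem?_replicate]
  have : ((cl.length : Int) + 1).toNat = cl.length + 1 := by omega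
  rw [this]
  by_cases h : m ≤ cl.length
  · rw [if_pos (by omega), if_pos h]; rfl
  · rw [if_neg (by omega), if_neg h]; rfl

lemma ws_init_cnt (cl : List Char) (m : Nat) (hm : m ≤ cl.length) :
    PySem.List.pyGetD (PySem.List.pySetD (PySem.List.pyRepeat [(-1 : Int)] ((cl.length : Int) + 1)) 0 0)
      (m : Int) (-1) = if m = 0 then 0 else -1 := by
  have hlen : (PySem.List.pyRepeat [(-1 : Int)] ((cl.length : Int) + 1)).length = cl.length + 1 := by
    rw [PySem.List.pyRepeat_singleton, List.length_replicate]; omega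
  rw [PySem.List.pySetD_of_nonneg _ _ (by norm_num)]
  rw [PySem.List.pyGetD_natCast]
  rw [List.getD_eq_getElem?_getD, List.getElem?_set]
  by_cases h0 : m = 0
  · subst h0
    rw [if_pos rfl, if_pos (by omega)]
    simp
  · rw [if_neg (by omega), if_neg h0, PySem.List.pyRepeat_singleton, List.getElem?_replicate]
    rw [if_pos (show m < ((cl.length : Int) + 1).toNat by omega)]
    rfl

lemma ws_fold (cl : List Char) (wl : List String) :
    ∀ K : Nat, K ≤ cl.length →
    wsInv cl (K + 1)
      ((PySem.List.pyRange 1 ((K : Int) + 1) 1).foldl (wsStepA cl wl)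
        (PySem.List.pySetD ((PySem.List.pyRange 0 ((cl.length : Int) + 1) 1).map
          (fun _ => ((none : Option (List String)), (-1 : Int)))) 0 (some [], 0)))
      ((PySem.List.pyRange 1 ((K : Int) + 1) 1).foldl (wsStepB cl wl)
        (PySem.List.pySetD (PySem.List.pyRepeat [(-1 : Int)] ((cl.length : Int) + 1)) 0 0,
         PySem.List.pyRepeat [(-1 : Int)] ((cl.length : Int) + 1))).1
      ((PySem.List.pyRange 1 ((K : Int) + 1) 1).foldl (wsStepB cl wl)
        (PySem.List.pySetD (PySem.List.pyRepeat [(-1 : Int)] ((cl.length : Int) + 1)) 0 0,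
         PySem.List.pyRepeat [(-1 : Int)] ((cl.length : Int) + 1))).2 := by
  intro K
  induction K with
  | zero =>
    intro _
    rw [show ((0 : Nat) : Int) + 1 = 1 by norm_num]
    rw [PySem.List.pyRange_one_eq_nil le_rfl]
    simp only [List.foldl_nil]
    have hcast : ((cl.length : Int) + 1) = ((cl.length + 1 : Nat) : Int) := by push_cast; ring
    refine ⟨?_, ?_, ?_, ?_⟩
    · rw [PySem.List.length_pySetD, List.length_map, PySem.List.length_pyRange_one]; omega
    · rw [PySem.List.length_pySetD, PySem.List.pyRepeat_singleton, List.length_replicate]; omega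
    · rw [PySem.List.pyRepeat_singleton, List.length_replicate]; omega
    · intro m hm
      refine ⟨?_, ?_⟩
      · intro hm1
        have hm0 : m = 0 := by omega
        subst hm0
        rw [ws_init_dp cl 0 (by omega), ws_init_cnt cl 0 (by omega), if_pos rfl, if_pos rfl]
        exact ⟨rfl, by intro h; omega, fun _ => ⟨fun _ => rfl, fun h => absurd h (by omega)⟩⟩
      · intro h1m
        rw [ws_init_dp cl m hm, ws_init_cnt cl m hm, if_neg (by omega), if_neg (by omega),
          ws_init_flat cl (-1) m, if_pos hm]
        exact ⟨rfl, rfl, rfl⟩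
  | succ K ih =>
    intro hK
    have ihK := ih (by omega)
    rw [show ((K + 1 : Nat) : Int) + 1 = ((K : Int) + 1) + 1 by push_cast; ring]
    rw [PySem.List.pyRange_one_succ_right (by omega : (1 : Int) ≤ (K : Int) + 1)]
    simp only [List.foldl_append, List.foldl_cons, List.foldl_nil]
    have hstep := ws_step cl wl (K + 1) (by omega) hK _
      ((PySem.List.pyRange 1 ((K : Int) + 1) 1).foldl (wsStepB cl wl)
        (PySem.List.pySetD (PySem.List.pyRepeat [(-1 : Int)] ((cl.length : Int) + 1)) 0 0,
         PySem.List.pyRepeat [(-1 : Int)] ((cl.length : Int) + 1))).1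
      ((PySem.List.pyRange 1 ((K : Int) + 1) 1).foldl (wsStepB cl wl)
        (PySem.List.pySetD (PySem.List.pyRepeat [(-1 : Int)] ((cl.length : Int) + 1)) 0 0,
         PySem.List.pyRepeat [(-1 : Int)] ((cl.length : Int) + 1))).2 ihK
    rw [show ((K + 1 : Nat) : Int) = (K : Int) + 1 by push_cast; ring] at hstep
    simpa only [Prod.mk.eta] using hstep

lemma ws_rebuild_eq (cl : List Char) (dp : List (Option (List String) × Int)) (cnt back : List Int)
    (hInv : wsInv cl (cl.length + 1) dp cnt back) :
    ∀ m : Nat, m ≤ cl.length → ∀ S, (PySem.List.pyGetD dp (m : Int) (none, -1)).1 = some S →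
      ∀ fuel, m ≤ fuel → ∀ out, wsRebuild cl back fuel (m : Int) out = out ++ S.reverse := by
  obtain ⟨hdl, hcl, hbl, hAll⟩ := hInv
  intro m
  induction m using Nat.strong_induction_on with
  | _ m ihm =>
    intro hm S hS fuel hfuel out
    obtain ⟨hd2, hneg, hpos⟩ := (hAll m hm).1 (by omega)
    have hge : 0 ≤ PySem.List.pyGetD cnt (m : Int) (-1) := by
      by_contra hlt
      push_neg at hlt
      have h := hneg hlt
      rw [hS] at h; simp at h
    rcases Nat.eq_zero_or_pos m with hm0 | hm0
    · subst hm0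
      have hdp0 := (hpos hge).1 rfl
      have hS0 : S = [] := by
        have : (PySem.List.pyGetD dp ((0 : Nat) : Int) (none, -1)).1 = some [] := by rw [hdp0]
        rw [hS] at this; simpa using this.symm
      subst hS0
      cases fuel with
      | zero => simp [wsRebuild]
      | succ f => simp [wsRebuild]
    · obtain ⟨b, g1, g2, S', cb, g3, g4⟩ := (hpos hge).2 hm0
      have hSeq : S = S' ++ [String.ofList (PySem.List.slice cl (some (b : Int)) (some (m : Int)))] := by
        rw [hS] at g4; exact Option.some.inj g4
      cases fuel with
      | zero => omega
      | succ f =>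
        rw [wsRebuild]
        rw [if_pos (by exact_mod_cast hm0)]
        simp only [g1]
        rw [ihm b g2 (by omega) S' (by rw [g3]) f (by omega)]
        rw [hSeq]
        simp [List.reverse_append]

-- ===== VERDICT (by name: the statement is the Claim_ definition above) =====
theorem word_segment_spec : Claim_equal_word_segment := by
  intro letters wl _
  unfold Spec_word_segment
  unfold word_segment word_segment_alt
  simp only [PySem.Str.len_eq]
  have hInv := ws_fold letters.toList wl letters.toList.length le_rfl
  obtain ⟨hdl, hcl, hbl, hAll⟩ := ws_fold letters.toList wl letters.toList.length le_rfl
  obtain ⟨hd2, hneg, hpos⟩ := (hAll letters.toList.length le_rfl).1 (by omega)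
  by_cases hlt : PySem.List.pyGetD ((PySem.List.pyRange 1 ((letters.toList.length : Int) + 1) 1).foldl
      (wsStepB letters.toList wl)
      (PySem.List.pySetD (PySem.List.pyRepeat [(-1 : Int)] ((letters.toList.length : Int) + 1)) 0 0,
       PySem.List.pyRepeat [(-1 : Int)] ((letters.toList.length : Int) + 1))).1
      ((letters.toList.length : Int)) (-1) < 0
  · have hnone := hneg hlt
    rw [hnone, if_pos hlt]
  · push_neg at hlt
    have hsome : ∃ S, (PySem.List.pyGetD ((PySem.List.pyRange 1 ((letters.toList.length : Int) + 1) 1).foldl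
        (wsStepA letters.toList wl)
        (PySem.List.pySetD ((PySem.List.pyRange 0 ((letters.toList.length : Int) + 1) 1).map
          (fun _ => ((none : Option (List String)), (-1 : Int)))) 0 (some [], 0)))
        ((letters.toList.length : Int)) (none, -1)).1 = some S := by
      rcases Nat.eq_zero_or_pos letters.toList.length with h0 | h0
      · refine ⟨[], ?_⟩
        have := (hpos hlt).1 h0
        rw [h0] at this ⊢
        rw [this]
      · obtain ⟨b, _, _, S', cb, _, g4⟩ := (hpos hlt).2 h0
        exact ⟨_, g4⟩
    obtain ⟨S, hS⟩ := hsome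
    rw [hS, if_neg (by omega)]
    rw [ws_rebuild_eq letters.toList _ _ _ hInv letters.toList.length le_rfl S hS
      letters.toList.length le_rfl []]
    simp
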